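-- pv_equiv track=rewrite | github.com/RalfRemoteTrading/AutoVideoEditor | render_video.py | get_speaking_intervalls
-- ===== SOURCE A (Python) =====
-- def get_speaking_intervalls(silent_intervals, video_len):
--     speaking_intervals = []
--
--     if silent_intervals[0][0] != 0:
--         speaking_intervals.append([0, silent_intervals[0][0]])
--
--     for i in range(len(silent_intervals)-1):
--         speaking_start = silent_intervals[i][1]
--         speaking_end =  silent_intervals[i+1][0]
--         speaking_intervals.append([speaking_start, speaking_end])
--
--     if silent_intervals[-1][1] != video_len:
--         speaking_intervals.append([silent_intervals[-1][1], video_len])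
--
--     return speaking_intervals
-- ===== SOURCE B (Python) =====
-- def get_speaking_intervalls(silent_intervals, video_len):
--     lo = silent_intervals[0][0]
--     hi = silent_intervals[-1][1]
--     boundaries = [0]
--     for iv in silent_intervals:
--         boundaries.append(iv[0])
--         boundaries.append(iv[1])
--     boundaries.append(video_len)
--     pairs = []
--     rest = boundaries
--     while len(rest) >= 2:
--         pairs.append([rest[0], rest[1]])
--         rest = rest[2:]
--     if lo == 0:
--         pairs.pop(0)
--     if hi == video_len:
--         pairs.pop()
--     return pairs
-- ===== Notes on version B (the rewrite author's own statement) =====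
-- stated objective: alternative
-- what changed: Instead of emitting gap intervals with conditional head/tail appends and an index loop over adjacent pairs, B builds one flat boundary list [0, s0, e0, ..., s_last, e_last, video_len], pairs it up two-at-a-time into all candidate speaking intervals, and then pops the first pair iff the silence starts at 0 and the last pair iff it ends at video_len.
import Mathlib
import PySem

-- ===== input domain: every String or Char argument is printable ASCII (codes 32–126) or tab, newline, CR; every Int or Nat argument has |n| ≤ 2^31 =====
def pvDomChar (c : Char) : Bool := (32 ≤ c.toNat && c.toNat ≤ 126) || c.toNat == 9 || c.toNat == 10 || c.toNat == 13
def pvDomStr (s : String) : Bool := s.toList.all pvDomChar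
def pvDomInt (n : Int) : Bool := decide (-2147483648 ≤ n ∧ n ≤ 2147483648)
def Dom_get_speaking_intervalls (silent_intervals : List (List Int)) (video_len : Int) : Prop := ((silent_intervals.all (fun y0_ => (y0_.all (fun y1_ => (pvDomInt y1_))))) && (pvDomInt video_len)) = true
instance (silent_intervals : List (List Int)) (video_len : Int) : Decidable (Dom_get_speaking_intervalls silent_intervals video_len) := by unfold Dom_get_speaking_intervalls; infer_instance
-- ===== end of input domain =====

-- B builds one flat boundary list, pairs it up two-at-a-time into candidate speaking
-- intervals, and pops the positional first/last pair when the silence touches 0 /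
-- video_len (objective: alternative decomposition, same cost).

-- silent_intervals[i][j] as an Int; the .getD 0 default is never reached under Pre_
def pvAt2 (si : List (List Int)) (i j : Int) : Int :=
  ((PySem.List.pyGet? si i).bind (fun iv => PySem.List.pyGet? iv j)).getD 0

-- ===== PORT A =====
def get_speaking_intervalls (silent_intervals : List (List Int)) (video_len : Int) : List (List Int) :=
  let s0 : List (List Int) :=
    if pvAt2 silent_intervals 0 0 ≠ 0 then [[0, pvAt2 silent_intervals 0 0]] else []
  let s1 := (PySem.List.pyRange 0 ((silent_intervals.length : Int) - 1) 1).foldl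
    (fun acc i => acc ++ [[pvAt2 silent_intervals i 1, pvAt2 silent_intervals (i + 1) 0]]) s0
  if pvAt2 silent_intervals (-1) 1 ≠ video_len then
    s1 ++ [[pvAt2 silent_intervals (-1) 1, video_len]]
  else s1

-- ===== PORT B =====
-- iv[j] as an Int; the .getD 0 default is never reached under Pre_
def pvBGet (iv : List Int) (j : Int) : Int := (PySem.List.pyGet? iv j).getD 0

-- the 'while len(rest) >= 2' loop of Source B: take rest[0], rest[1], continue on rest[2:]
def pvBPairUp : List Int → List (List Int)
  | a :: b :: rest => [a, b] :: pvBPairUp rest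
  | _ => []

def get_speaking_intervalls_alt (silent_intervals : List (List Int)) (video_len : Int) : List (List Int) :=
  -- video_len is used below; name reused
  let lo := pvAt2 silent_intervals 0 0
  let hi := pvAt2 silent_intervals (-1) 1
  let boundaries := silent_intervals.foldl
    (fun acc iv => acc ++ [pvBGet iv 0, pvBGet iv 1]) [(0 : Int)]
  let boundaries := boundaries ++ [video_len]
  let pairs := pvBPairUp boundaries
  let pairs := if lo = 0 then pairs.drop 1 else pairs
  if hi = video_len then pairs.dropLast else pairs

-- ===== PRECONDITION & SPEC =====
-- Exactly the inputs on which Python A returns: a nonempty interval list whose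
-- intervals each have at least two entries (otherwise A raises IndexError).
def Pre_get_speaking_intervalls (silent_intervals : List (List Int)) (video_len : Int) : Prop :=
  silent_intervals ≠ [] ∧ ∀ iv ∈ silent_intervals, 2 ≤ iv.length
instance (silent_intervals : List (List Int)) (video_len : Int) : Decidable (Pre_get_speaking_intervalls silent_intervals video_len) := by unfold Pre_get_speaking_intervalls; infer_instance

def pvWitness_get_speaking_intervalls : List (List Int) × Int := ([[1, 2], [3, 4]], 5)

def Spec_get_speaking_intervalls (silent_intervals : List (List Int)) (video_len : Int) (out : List (List Int)) : Prop := out = get_speaking_intervalls_alt silent_intervals video_len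
instance (silent_intervals : List (List Int)) (video_len : Int) (out : List (List Int)) : Decidable (Spec_get_speaking_intervalls silent_intervals video_len out) := by unfold Spec_get_speaking_intervalls; infer_instance

-- ===== CLAIM (what is proved, stated in full; the proofs are below) =====
def Claim_equal_get_speaking_intervalls : Prop := ∀ (silent_intervals : List (List Int)) (video_len : Int), Dom_get_speaking_intervalls silent_intervals video_len → Pre_get_speaking_intervalls silent_intervals video_len → Spec_get_speaking_intervalls silent_intervals video_len (get_speaking_intervalls silent_intervals video_len)

-- ===== LEMMAS AND PROOFS =====

-- the "middle gaps" [end_i, start_{i+1}] of the interval list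
def pvMids : List (List Int) → List (List Int)
  | x :: y :: t => [pvBGet x 1, pvBGet y 0] :: pvMids (y :: t)
  | _ => []

-- last silent end, i.e. silent_intervals[-1][1]
def pvHi (si : List (List Int)) : Int :=
  (si.getLast?.bind (fun iv => PySem.List.pyGet? iv 1)).getD 0

lemma pvBPairUp_cons_cons (a b : Int) (r : List Int) :
    pvBPairUp (a :: b :: r) = [a, b] :: pvBPairUp r := rfl

lemma pvA_foldl_map (l : List Int) (f : Int → List Int) :
    ∀ (s : List (List Int)), l.foldl (fun acc i => acc ++ [f i]) s = s ++ l.map f := by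
  induction l with
  | nil => simp
  | cons a l ih => intro s; simp [List.foldl, ih]

lemma pvB_foldl_flat (l : List (List Int)) :
    ∀ (s : List Int), l.foldl (fun acc iv => acc ++ [pvBGet iv 0, pvBGet iv 1]) s
      = s ++ l.flatMap (fun iv => [pvBGet iv 0, pvBGet iv 1]) := by
  induction l with
  | nil => simp
  | cons a l ih => intro s; simp [List.foldl, ih]

lemma pvTail_eq (vl : Int) :
    ∀ (t : List (List Int)) (x : List Int),
      pvBPairUp (pvBGet x 1 :: t.flatMap (fun iv => [pvBGet iv 0, pvBGet iv 1]) ++ [vl])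
        = pvMids (x :: t) ++ [[pvHi (x :: t), vl]] := by
  intro t
  induction t with
  | nil => intro x; simp [pvBPairUp, pvMids, pvHi, pvBGet]
  | cons y t' ih =>
    intro x
    have h := ih y
    simp only [List.flatMap_cons, List.cons_append, List.nil_append] at h ⊢
    rw [pvBPairUp_cons_cons, h]
    simp [pvMids, pvHi, List.getLast?_cons_cons]

lemma pvAt2_cons_succ (x : List Int) (si : List (List Int)) (k : Nat) (j : Int) :
    pvAt2 (x :: si) ((k : Int) + 1) j = pvAt2 si (k : Int) j := by
  simp [pvAt2, PySem.List.pyGet?_cons_succ]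

lemma pvMids_eq :
    ∀ (si : List (List Int)),
      (PySem.List.pyRange 0 ((si.length : Int) - 1) 1).map
        (fun i => [pvAt2 si i 1, pvAt2 si (i + 1) 0]) = pvMids si := by
  intro si
  induction si with
  | nil => simp [PySem.List.pyRange_one_eq_nil, pvMids]
  | cons x t ih =>
    cases t with
    | nil => simp [PySem.List.pyRange_one_eq_nil, pvMids]
    | cons y t' =>
      rw [PySem.List.pyRange_one_cons (by simp only [List.length_cons]; push_cast; omega)]
      simp only [List.map_cons]
      have h1 : pvAt2 (x :: y :: t') 0 1 = pvBGet x 1 := by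
        simp [pvAt2, pvBGet, PySem.List.pyGet?_zero_cons]
      have h2 : pvAt2 (x :: y :: t') (0 + 1) 0 = pvBGet y 0 := by
        rw [show ((0 : Int) + 1) = (((0 : Nat) : Int) + 1) by norm_num, pvAt2_cons_succ]
        simp [pvAt2, pvBGet, PySem.List.pyGet?_zero_cons]
      have hm : pvMids (x :: y :: t') = [pvBGet x 1, pvBGet y 0] :: pvMids (y :: t') := rfl
      rw [h1, h2, hm]
      congr 1
      rw [← ih]
      have hl : (((y :: t').length : Int) - 1) = (t'.length : Int) := by simp
      have hl2 : (((x :: y :: t').length : Int) - 1) = (t'.length : Int) + 1 := by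
        simp only [List.length_cons]; push_cast; ring
      rw [hl, hl2]
      rw [PySem.List.pyRange_one, PySem.List.pyRange_one]
      have hn1 : (((t'.length : Int) + 1) - (0 + 1)).toNat = t'.length := by omega
      have hn2 : (((t'.length : Int)) - 0).toNat = t'.length := by omega
      rw [hn1, hn2, List.map_map, List.map_map]
      apply List.map_congr_left
      intro k hk
      simp only [Function.comp_apply]
      have e2 : ((0 : Int) + 1 + (k : Int) + 1) = (((k + 1 : Nat) : Int) + 1) := by
        push_cast; ring
      have e1 : ((0 : Int) + 1 + (k : Int)) = ((k : Int) + 1) := by ring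
      have e4 : ((0 : Int) + (k : Int)) = (k : Int) := by ring
      rw [e2, e1, e4, pvAt2_cons_succ, pvAt2_cons_succ]
      have e3 : (((k + 1 : Nat)) : Int) = (k : Int) + 1 := by push_cast; ring
      rw [e3]

-- ===== VERDICT (by name: the statement is the Claim_ definition above) =====
theorem get_speaking_intervalls_spec : Claim_equal_get_speaking_intervalls := by
  intro si vl _hdom hpre
  obtain ⟨hne, -⟩ := hpre
  unfold Spec_get_speaking_intervalls
  obtain ⟨x, t, rfl⟩ := List.exists_cons_of_ne_nil hne
  simp only [get_speaking_intervalls, get_speaking_intervalls_alt]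
  rw [pvA_foldl_map, pvMids_eq, pvB_foldl_flat]
  have hlo : pvAt2 (x :: t) 0 0 = pvBGet x 0 := by
    simp [pvAt2, pvBGet, PySem.List.pyGet?_zero_cons]
  have hhi : pvAt2 (x :: t) (-1) 1 = pvHi (x :: t) := by
    simp [pvAt2, pvHi, PySem.List.pyGet?_neg_one]
  have hb : pvBPairUp (([(0 : Int)] ++ (x :: t).flatMap (fun iv => [pvBGet iv 0, pvBGet iv 1])) ++ [vl])
      = [0, pvBGet x 0] :: (pvMids (x :: t) ++ [[pvHi (x :: t), vl]]) := by
    simp only [List.flatMap_cons, List.singleton_append, List.cons_append, List.nil_append]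
    rw [pvBPairUp_cons_cons]
    exact congrArg (List.cons [0, pvBGet x 0]) (pvTail_eq vl t x)
  rw [hlo, hhi, hb]
  by_cases h1 : pvBGet x 0 = 0 <;> by_cases h2 : pvHi (x :: t) = vl <;>
    simp [h1, h2, List.dropLast_concat] <;>
    rw [← List.cons_append, List.dropLast_concat]
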